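-- pv_equiv track=rewrite | github.com/linlin200217/JlyphV2_Backend | utils.py | determine_form
-- ===== SOURCE A (Python) =====
-- def determine_form(dic_list):
--     unique_forms = set()
--     for dic in dic_list:
--         form = dic.get('Form')
--         if form:
--             unique_forms.add(form)
--     combinations = {
--         frozenset(['Size']): "Size",
--         frozenset(['Number_Vertical']): "Number_Vertical",
--         frozenset(['Number_Horizontal']): "Number_Horizontal",
--         frozenset(['Number_Path']): "Number_Path",
--         frozenset(['Size', 'Number_Vertical']): "Size_Number_Vertical",
--         frozenset(['Size', 'Number_Horizontal']): "Size_Number_Horizontal",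
--         frozenset(['Size', 'Number_Path']): "Size_Number_Path",
--     }
--     return combinations.get(frozenset(unique_forms), "Undefined Combination")
-- ===== SOURCE B (Python) =====
-- _NUMBER_TAGS = frozenset({'Number_Vertical', 'Number_Horizontal', 'Number_Path'})
--
--
-- def determine_form(dic_list):
--     forms = {d.get('Form') for d in dic_list if d.get('Form')}
--     has_size = 'Size' in forms
--     numbers = forms - {'Size'}
--     if numbers <= _NUMBER_TAGS and len(numbers) <= 1 and (has_size or numbers):
--         return '_'.join((['Size'] if has_size else []) + sorted(numbers))
--     return 'Undefined Combination'
-- ===== Notes on version B (the rewrite author's own statement) =====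
-- stated objective: simpler
-- what changed: Replaces A's 7-key frozenset lookup table by direct set reasoning: split the collected forms into the optional 'Size' tag and the remaining number tags, validate with subset/size checks, and assemble the label with '_'.join.
import Mathlib
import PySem

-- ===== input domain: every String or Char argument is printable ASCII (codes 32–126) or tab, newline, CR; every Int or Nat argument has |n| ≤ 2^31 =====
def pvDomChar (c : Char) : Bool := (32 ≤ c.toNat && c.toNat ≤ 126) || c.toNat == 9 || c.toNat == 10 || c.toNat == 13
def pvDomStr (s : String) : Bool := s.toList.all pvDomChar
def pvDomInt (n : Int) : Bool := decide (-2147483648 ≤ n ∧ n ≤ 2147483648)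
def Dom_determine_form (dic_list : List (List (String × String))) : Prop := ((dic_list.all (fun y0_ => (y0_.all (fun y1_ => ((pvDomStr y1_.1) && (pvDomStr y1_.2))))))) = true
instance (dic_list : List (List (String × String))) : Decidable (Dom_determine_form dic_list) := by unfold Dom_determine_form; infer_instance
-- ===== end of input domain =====

-- B replaces A's 7-key frozenset lookup table by direct set reasoning (subset/size checks
-- plus string assembly); objective: simpler. Return values agree on all inputs.

-- ===== PORT A =====
-- A's frozenset-keyed dict lookup is ported as set-equality tests in the dict's insertion
-- order (the keys are pairwise distinct as sets, so lookup order is immaterial).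
def determine_form (dic_list : List (List (String × String))) : String :=
  let unique_forms : PySem.Set String := dic_list.foldl (fun s dic =>
    match PySem.Dict.get? ⟨dic⟩ "Form" with
    | some form => if form ≠ "" then PySem.Set.add s form else s
    | none => s) PySem.Set.empty
  if PySem.Set.equal unique_forms ["Size"] then "Size"
  else if PySem.Set.equal unique_forms ["Number_Vertical"] then "Number_Vertical"
  else if PySem.Set.equal unique_forms ["Number_Horizontal"] then "Number_Horizontal"
  else if PySem.Set.equal unique_forms ["Number_Path"] then "Number_Path"
  else if PySem.Set.equal unique_forms ["Size", "Number_Vertical"] then "Size_Number_Vertical"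
  else if PySem.Set.equal unique_forms ["Size", "Number_Horizontal"] then "Size_Number_Horizontal"
  else if PySem.Set.equal unique_forms ["Size", "Number_Path"] then "Size_Number_Path"
  else "Undefined Combination"

-- ===== PORT B =====
def pvNumberTags : PySem.Set String := ["Number_Vertical", "Number_Horizontal", "Number_Path"]

def determine_form_alt (dic_list : List (List (String × String))) : String :=
  let forms : PySem.Set String := dic_list.foldl (fun s d =>
    match PySem.Dict.get? ⟨d⟩ "Form" with
    | some f => if f ≠ "" then PySem.Set.add s f else s
    | none => s) PySem.Set.empty
  let has_size := PySem.Set.contains forms "Size"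
  let numbers := PySem.Set.diff forms ["Size"]
  if PySem.Set.issubset numbers pvNumberTags && decide (PySem.Set.len numbers ≤ 1)
      && (has_size || !numbers.isEmpty) then
    PySem.Str.join "_" ((if has_size then ["Size"] else []) ++ PySem.List.sorted numbers (fun x => x))
  else "Undefined Combination"

-- ===== PRECONDITION & SPEC =====
def Spec_determine_form (dic_list : List (List (String × String))) (out : String) : Prop := out = determine_form_alt dic_list
instance (dic_list : List (List (String × String))) (out : String) : Decidable (Spec_determine_form dic_list out) := by unfold Spec_determine_form; infer_instance

-- ===== CLAIM (what is proved, stated in full; the proofs are below) =====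
def Claim_equal_determine_form : Prop := ∀ (dic_list : List (List (String × String))), Dom_determine_form dic_list → Spec_determine_form dic_list (determine_form dic_list)

-- ===== LEMMAS AND PROOFS =====

-- phase 1 (shared by both sources, literally the same loop): the set of non-empty 'Form' values
def dfForms (dic_list : List (List (String × String))) : PySem.Set String :=
  dic_list.foldl (fun s dic =>
    match PySem.Dict.get? ⟨dic⟩ "Form" with
    | some form => if form ≠ "" then PySem.Set.add s form else s
    | none => s) PySem.Set.empty

-- phase 2 of each port, as a function of the set
def phaseA (S : PySem.Set String) : String :=
  if PySem.Set.equal S ["Size"] then "Size"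
  else if PySem.Set.equal S ["Number_Vertical"] then "Number_Vertical"
  else if PySem.Set.equal S ["Number_Horizontal"] then "Number_Horizontal"
  else if PySem.Set.equal S ["Number_Path"] then "Number_Path"
  else if PySem.Set.equal S ["Size", "Number_Vertical"] then "Size_Number_Vertical"
  else if PySem.Set.equal S ["Size", "Number_Horizontal"] then "Size_Number_Horizontal"
  else if PySem.Set.equal S ["Size", "Number_Path"] then "Size_Number_Path"
  else "Undefined Combination"

def phaseB (S : PySem.Set String) : String :=
  if PySem.Set.issubset (PySem.Set.diff S ["Size"]) pvNumberTags
      && decide (PySem.Set.len (PySem.Set.diff S ["Size"]) ≤ 1)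
      && (PySem.Set.contains S "Size" || !(PySem.Set.diff S ["Size"]).isEmpty) then
    PySem.Str.join "_" ((if PySem.Set.contains S "Size" then ["Size"] else [])
      ++ PySem.List.sorted (PySem.Set.diff S ["Size"]) (fun x => x))
  else "Undefined Combination"

lemma A_eq (l : List (List (String × String))) : determine_form l = phaseA (dfForms l) := rfl
lemma B_eq (l : List (List (String × String))) : determine_form_alt l = phaseB (dfForms l) := rfl

lemma nodup_dfForms (l : List (List (String × String))) : (dfForms l).Nodup := by
  unfold dfForms
  have h : ∀ (s : PySem.Set String), s.Nodup →
      (l.foldl (fun s dic =>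
        match PySem.Dict.get? ⟨dic⟩ "Form" with
        | some form => if form ≠ "" then PySem.Set.add s form else s
        | none => s) s).Nodup := by
    induction l with
    | nil => intro s hs; simpa using hs
    | cons d t ih =>
      intro s hs
      simp only [List.foldl_cons]
      apply ih
      cases PySem.Dict.get? ⟨d⟩ "Form" with
      | none => exact hs
      | some f =>
        by_cases hf : f = ""
        · simpa [hf] using hs
        · simpa [hf] using PySem.Set.nodup_add s f hs
  exact h _ List.nodup_nil

def L4 : List String := ["Size", "Number_Vertical", "Number_Horizontal", "Number_Path"]

lemma contains_perm {S T : List String} (hp : S.Perm T) (a : String) :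
    PySem.Set.contains S a = PySem.Set.contains T a := by
  simp [PySem.Set.contains, List.contains_eq_mem, hp.mem_iff]

lemma equal_perm {S T : List String} (hp : S.Perm T) (K : List String) :
    PySem.Set.equal S K = PySem.Set.equal T K := by
  simp only [PySem.Set.equal, PySem.Set.issubset]
  rw [hp.all_eq]
  congr 1
  exact List.all_congr rfl (fun a => contains_perm hp a)

lemma phaseA_congr {S T : List String} (hp : S.Perm T) : phaseA S = phaseA T := by
  unfold phaseA
  rw [equal_perm hp, equal_perm hp, equal_perm hp, equal_perm hp, equal_perm hp,
      equal_perm hp, equal_perm hp]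

lemma perm_eq_of_length_le_one {l m : List String} (hp : l.Perm m) (h : m.length ≤ 1) : l = m := by
  cases m with
  | nil => exact hp.eq_nil
  | cons a t =>
    cases t with
    | nil => exact List.Perm.eq_singleton hp
    | cons b u => simp at h

lemma phaseB_congr {S T : List String} (hp : S.Perm T) : phaseB S = phaseB T := by
  unfold phaseB
  have hnum : (PySem.Set.diff S ["Size"]).Perm (PySem.Set.diff T ["Size"]) := by
    exact List.Perm.filter _ hp
  have hsub : PySem.Set.issubset (PySem.Set.diff S ["Size"]) pvNumberTags
      = PySem.Set.issubset (PySem.Set.diff T ["Size"]) pvNumberTags := by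
    simp only [PySem.Set.issubset]
    exact hnum.all_eq
  have hlen : PySem.Set.len (PySem.Set.diff S ["Size"]) = PySem.Set.len (PySem.Set.diff T ["Size"]) := by
    simp [PySem.Set.len, hnum.length_eq]
  have hemp : (PySem.Set.diff S ["Size"]).isEmpty = (PySem.Set.diff T ["Size"]).isEmpty := by
    by_cases h : PySem.Set.diff T ["Size"] = []
    · have hn := hnum
      rw [h] at hn
      rw [h, hn.eq_nil]
    · have h2 : PySem.Set.diff S ["Size"] ≠ [] := by
        intro hh
        have hn := hnum
        rw [hh] at hn
        exact h hn.symm.eq_nil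
      rcases hS' : PySem.Set.diff S ["Size"] with _ | ⟨a, t⟩
      · exact absurd hS' h2
      · rcases hT' : PySem.Set.diff T ["Size"] with _ | ⟨b, u⟩
        · exact absurd hT' h
        · rfl
  have hcon := contains_perm hp "Size"
  rw [hsub, hlen, hemp, hcon]
  by_cases hg : (PySem.Set.issubset (PySem.Set.diff T ["Size"]) pvNumberTags
      && decide (PySem.Set.len (PySem.Set.diff T ["Size"]) ≤ 1)
      && (PySem.Set.contains T "Size" || !(PySem.Set.diff T ["Size"]).isEmpty)) = true
  · rw [hg]
    simp only [if_true]
    have hle : (PySem.Set.diff T ["Size"]).length ≤ 1 := by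
      have := hg
      simp only [Bool.and_eq_true, decide_eq_true_eq] at this
      have h1 := this.1.2
      simpa [PySem.Set.len] using h1
    rw [perm_eq_of_length_le_one hnum hle]
  · simp only [Bool.not_eq_true] at hg
    rw [hg]
    simp

lemma reduce {S T : List String} (hnd : S.Nodup) (hT : T.Nodup)
    (hmem : ∀ a, a ∈ S ↔ a ∈ T) (hAB : phaseA T = phaseB T) : phaseA S = phaseB S := by
  have hp : S.Perm T := (List.perm_ext_iff_of_nodup hnd hT).mpr hmem
  rw [phaseA_congr hp, phaseB_congr hp, hAB]

lemma equal_false_of_mem_notmem {S K : List String} {x : String} (hx : x ∈ S) (hk : x ∉ K) :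
    PySem.Set.equal S K = false := by
  simp only [PySem.Set.equal, Bool.and_eq_false_iff]
  left
  simp only [PySem.Set.issubset, PySem.Set.contains, List.all_eq_false]
  exact ⟨x, hx, by simpa [List.contains_eq_mem] using hk⟩

lemma phaseA_undef {S : List String} {x : String} (hx : x ∈ S) (hx4 : x ∉ L4) :
    phaseA S = "Undefined Combination" := by
  simp only [L4, List.mem_cons, not_or, List.not_mem_nil] at hx4
  obtain ⟨n1, n2, n3, n4, -⟩ := hx4
  unfold phaseA
  rw [equal_false_of_mem_notmem hx (by simp [n1]),
      equal_false_of_mem_notmem hx (by simp [n2]),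
      equal_false_of_mem_notmem hx (by simp [n3]),
      equal_false_of_mem_notmem hx (by simp [n4]),
      equal_false_of_mem_notmem hx (by simp [n1, n2]),
      equal_false_of_mem_notmem hx (by simp [n1, n3]),
      equal_false_of_mem_notmem hx (by simp [n1, n4])]
  simp

lemma phaseB_undef {S : List String} {x : String} (hx : x ∈ S) (hx4 : x ∉ L4) :
    phaseB S = "Undefined Combination" := by
  simp only [L4, List.mem_cons, not_or, List.not_mem_nil] at hx4
  obtain ⟨n1, n2, n3, n4, -⟩ := hx4
  unfold phaseB
  have hxnum : x ∈ PySem.Set.diff S ["Size"] := by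
    simp [PySem.Set.diff, PySem.Set.contains, List.mem_filter, hx, List.contains_eq_mem, n1]
  have hsub : PySem.Set.issubset (PySem.Set.diff S ["Size"]) pvNumberTags = false := by
    simp only [PySem.Set.issubset, List.all_eq_false]
    exact ⟨x, hxnum, by simp [pvNumberTags, PySem.Set.contains, List.contains_eq_mem, n2, n3, n4]⟩
  rw [hsub]
  simp

lemma phase_eq (S : List String) (hnd : S.Nodup) : phaseA S = phaseB S := by
  by_cases hoth : ∀ x ∈ S, x ∈ L4
  · apply reduce hnd (T := L4.filter (fun a => decide (a ∈ S)))
    · exact List.Nodup.filter _ (by decide)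
    · intro a
      constructor
      · intro ha
        exact List.mem_filter.mpr ⟨hoth a ha, by simpa using ha⟩
      · intro ha
        simpa using (List.mem_filter.mp ha).2
    · by_cases h1 : "Size" ∈ S <;> by_cases h2 : "Number_Vertical" ∈ S <;>
        by_cases h3 : "Number_Horizontal" ∈ S <;> by_cases h4 : "Number_Path" ∈ S <;>
        simp only [L4, List.filter, h1, h2, h3, h4, decide_true, decide_false] <;> decide
  · push Not at hoth
    obtain ⟨x, hxS, hx4⟩ := hoth
    rw [phaseA_undef hxS hx4, phaseB_undef hxS hx4]

-- ===== VERDICT (by name: the statement is the Claim_ definition above) =====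
theorem determine_form_spec : Claim_equal_determine_form := by
  intro l _
  unfold Spec_determine_form
  rw [A_eq, B_eq]
  exact phase_eq _ (nodup_dfForms l)
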